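-- pv_equiv track=rewrite | github.com/rhythm-semwal/DS-Algo | Arrays/Replicating Substring.py | solve
-- ===== SOURCE A (Python) =====
-- def solve(A, B):
--     n = len(B)
--     if n % A != 0:
--         return -1
--
--     char_freq_hash_map = dict()
--
--     for i in range(n):
--         if B[i] not in char_freq_hash_map:
--             char_freq_hash_map[B[i]] = 1
--         else:
--             char_freq_hash_map[B[i]] += 1
--
--     for value in char_freq_hash_map.values():
--         if value % A != 0:
--             return -1
--     return 1
-- ===== SOURCE B (Python) =====
-- def solve(A, B):
--     if len(B) % A != 0:
--         return -1
--     run = 0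
--     prev = None
--     for c in sorted(B):
--         if c == prev:
--             run += 1
--         else:
--             if run % A != 0:
--                 return -1
--             prev = c
--             run = 1
--     if run % A != 0:
--         return -1
--     return 1
-- ===== Notes on version B (the rewrite author's own statement) =====
-- stated objective: alternative
-- what changed: Replaces the frequency hash map and second pass over its values by sorting B and run-length scanning the sorted characters, checking each completed run's length modulo A on the fly.
import Mathlib
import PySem

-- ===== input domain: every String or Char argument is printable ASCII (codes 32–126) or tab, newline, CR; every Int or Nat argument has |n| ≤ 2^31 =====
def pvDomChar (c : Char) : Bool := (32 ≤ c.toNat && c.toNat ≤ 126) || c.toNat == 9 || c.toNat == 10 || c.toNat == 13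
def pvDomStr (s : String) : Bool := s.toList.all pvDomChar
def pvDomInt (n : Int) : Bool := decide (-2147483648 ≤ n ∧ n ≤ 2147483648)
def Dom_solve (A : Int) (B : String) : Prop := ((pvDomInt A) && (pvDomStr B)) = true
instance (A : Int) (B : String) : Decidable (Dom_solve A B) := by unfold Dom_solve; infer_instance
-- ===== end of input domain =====

-- B replaces A's frequency hash map + pass over its values by sort-then-run-length scanning (alternative decomposition, same results).


-- ===== PORT A =====
-- the 'for i in range(n): … B[i] …' loop is ported as a fold over B's characters (the same values in the same order)
def solve (A : Int) (B : String) : Int :=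
  let n : Int := (B.toList.length : Int)
  if PySem.Int.mod n A ≠ 0 then -1
  else
    let d : PySem.Dict Char Int :=
      B.toList.foldl
        (fun d c => if d.contains c = false then d.insert c 1
                    else d.insert c (d.getD c 0 + 1))
        PySem.Dict.empty
    -- 'for value in …values(): if value % A != 0: return -1' then 'return 1'
    if d.values.any (fun v => decide (PySem.Int.mod v A ≠ 0)) then -1 else 1

-- ===== PORT B =====
-- the for-loop of Source B with its early returns and final run check, as structural recursion over the sorted characters
def solveAltLoop (A : Int) : List Char → Option Char → Int → Int
  | [], _, run => if PySem.Int.mod run A ≠ 0 then -1 else 1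
  | c :: rest, prev, run =>
    if (some c : Option Char) = prev then solveAltLoop A rest prev (run + 1)
    else if PySem.Int.mod run A ≠ 0 then -1
    else solveAltLoop A rest (some c) 1

def solve_alt (A : Int) (B : String) : Int :=
  if PySem.Int.mod ((B.toList.length : Int)) A ≠ 0 then -1
  else solveAltLoop A (PySem.List.sorted B.toList (fun c => c) false) none 0

-- ===== PRECONDITION & SPEC =====
-- A raises ZeroDivisionError when A = 0 (the 'n % A' guard); excluded (B raises there too).
def Pre_solve (A : Int) (B : String) : Prop := A ≠ 0
instance (A : Int) (B : String) : Decidable (Pre_solve A B) := by unfold Pre_solve; infer_instance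
def pvWitness_solve : Int × String := (2, "abab")
def Spec_solve (A : Int) (B : String) (out : Int) : Prop := out = solve_alt A B
instance (A : Int) (B : String) (out : Int) : Decidable (Spec_solve A B out) := by unfold Spec_solve; infer_instance

-- ===== CLAIM (what is proved, stated in full; the proofs are below) =====
def Claim_equal_solve : Prop := ∀ (A : Int) (B : String), Dom_solve A B → Pre_solve A B → Spec_solve A B (solve A B)

-- ===== LEMMAS AND PROOFS =====

-- A's two insert branches are one insert-with-increment, so the counting fold is Counter(B)
lemma solve_fold_eq_counter (l : List Char) :
    l.foldl (fun d c => if d.contains c = false then d.insert c 1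
                        else d.insert c (d.getD c 0 + 1)) PySem.Dict.empty
      = PySem.Dict.counter l := by
  rw [← PySem.Dict.foldl_insert_getD_add_one_eq_counter]
  congr 1
  funext d c
  by_cases h : d.contains c = false
  · simp [h, PySem.Dict.getD_of_not_contains (d := d) (k := c) (d0 := 0) h]
  · simp [h]

-- characterisation of Source B's scan on a sorted tail, p the current run's character, run its length so far
lemma solveAltLoop_some (A : Int) (s : List Char) (p : Char) (run : Int)
    (hs : s.Pairwise (· ≤ ·)) (hp : ∀ c ∈ s, p ≤ c) :
    solveAltLoop A s (some p) run
      = if A ∣ (run + (s.count p : Int)) ∧ ∀ c ∈ s, c ≠ p → A ∣ (s.count c : Int)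
        then 1 else -1 := by
  induction s generalizing p run with
  | nil =>
    simp only [solveAltLoop, PySem.Int.mod_eq_zero_iff_dvd, List.count_nil,
      List.not_mem_nil, ne_eq, Int.natCast_zero, add_zero, false_implies, implies_true, and_true]
    split_ifs <;> simp_all
  | cons c rest ih =>
    have hrest : rest.Pairwise (· ≤ ·) := hs.of_cons
    by_cases hc : c = p
    · subst hc
      rw [show solveAltLoop A (c :: rest) (some c) run = solveAltLoop A rest (some c) (run + 1) by
        simp [solveAltLoop]]
      rw [ih c (run + 1) hrest (fun d hd => List.rel_of_pairwise_cons hs hd)]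
      congr 1
      rw [eq_iff_iff]
      constructor
      · rintro ⟨h1, h2⟩
        constructor
        · have : run + ((c :: rest).count c : Int) = run + 1 + (rest.count c : Int) := by
            simp [List.count_cons_self]; ring
          rw [this]; exact h1
        · intro d hd hdp
          have : d ∈ rest := by
            rcases List.mem_cons.mp hd with h | h
            · exact absurd h hdp
            · exact h
          have := h2 d this hdp
          rwa [List.count_cons_of_ne (Ne.symm hdp)]
      · rintro ⟨h1, h2⟩
        constructor
        · have : run + ((c :: rest).count c : Int) = run + 1 + (rest.count c : Int) := by
            simp [List.count_cons_self]; ring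
          rw [this] at h1; exact h1
        · intro d hd hdp
          have := h2 d (List.mem_cons_of_mem _ hd) hdp
          rwa [List.count_cons_of_ne (Ne.symm hdp)] at this
    · have hpc : p < c := lt_of_le_of_ne (hp c List.mem_cons_self) (fun h => hc h.symm)
      have hnp : (c :: rest).count p = 0 := by
        rw [List.count_eq_zero]
        intro hmem
        rcases List.mem_cons.mp hmem with h | h
        · exact hc h.symm
        · exact absurd (List.rel_of_pairwise_cons hs h) (not_le.mpr hpc)
      rw [show solveAltLoop A (c :: rest) (some p) run
            = if PySem.Int.mod run A ≠ 0 then -1 else solveAltLoop A rest (some c) 1 by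
        simp [solveAltLoop, hc]]
      by_cases hrun : A ∣ run
      · rw [if_neg (by simp [PySem.Int.mod_eq_zero_iff_dvd, hrun])]
        rw [ih c 1 hrest (fun d hd => List.rel_of_pairwise_cons hs hd)]
        congr 1
        rw [eq_iff_iff]
        have hcc : (1 : Int) + (rest.count c : Int) = ((c :: rest).count c : Int) := by
          simp [List.count_cons_self]; ring
        constructor
        · rintro ⟨h1, h2⟩
          refine ⟨by simp [hnp, hrun], ?_⟩
          intro d hd hdp
          rcases List.mem_cons.mp hd with h | h
          · subst h; rwa [← hcc]
          · by_cases hdc : d = c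
            · subst hdc; rwa [← hcc]
            · have := h2 d h hdc
              rwa [List.count_cons_of_ne (Ne.symm hdc)]
        · rintro ⟨_, h2⟩
          constructor
          · rw [hcc]
            exact h2 c List.mem_cons_self hc
          · intro d hd hdc
            have hdp : d ≠ p := by
              intro h; subst h
              exact absurd (List.rel_of_pairwise_cons hs hd) (not_le.mpr hpc)
            have := h2 d (List.mem_cons_of_mem _ hd) hdp
            rwa [List.count_cons_of_ne (Ne.symm hdc)] at this
      · rw [if_pos (by simp [PySem.Int.mod_eq_zero_iff_dvd, hrun])]
        rw [if_neg]
        rintro ⟨h1, _⟩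
        rw [hnp] at h1
        simp at h1
        exact hrun h1

lemma solveAltLoop_none (A : Int) (s : List Char) (hs : s.Pairwise (· ≤ ·)) :
    solveAltLoop A s none 0
      = if ∀ c ∈ s, A ∣ (s.count c : Int) then 1 else -1 := by
  cases s with
  | nil => simp [solveAltLoop, PySem.Int.mod_eq_zero_iff_dvd]
  | cons c rest =>
    rw [show solveAltLoop A (c :: rest) none 0
          = if PySem.Int.mod 0 A ≠ 0 then -1 else solveAltLoop A rest (some c) 1 by
      simp [solveAltLoop]]
    rw [if_neg (by simp [PySem.Int.mod_eq_zero_iff_dvd])]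
    rw [solveAltLoop_some A rest c 1 hs.of_cons (fun d hd => List.rel_of_pairwise_cons hs hd)]
    congr 1
    rw [eq_iff_iff]
    have hcc : (1 : Int) + (rest.count c : Int) = ((c :: rest).count c : Int) := by
      simp [List.count_cons_self]; ring
    constructor
    · rintro ⟨h1, h2⟩
      intro d hd
      by_cases hdc : d = c
      · subst hdc; rwa [← hcc]
      · have := h2 d ((List.mem_cons.mp hd).resolve_left hdc) hdc
        rwa [List.count_cons_of_ne (Ne.symm hdc)]
    · intro h
      constructor
      · rw [hcc]; exact h c List.mem_cons_self
      · intro d hd hdc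
        have := h d (List.mem_cons_of_mem _ hd)
        rwa [List.count_cons_of_ne (Ne.symm hdc)] at this

-- ===== VERDICT (by name: the statement is the Claim_ definition above) =====
theorem solve_spec : Claim_equal_solve := by
  intro A B _ _
  unfold Spec_solve solve solve_alt
  by_cases hg : PySem.Int.mod ((B.toList.length : Int)) A ≠ 0
  · rw [if_pos hg, if_pos hg]
  · rw [if_neg hg, if_neg hg]
    rw [solve_fold_eq_counter]
    rw [solveAltLoop_none A _ (by simpa using PySem.List.sorted_pairwise B.toList (fun c => c))]
    have hv : (PySem.Dict.counter B.toList).values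
        = (PySem.Set.ofList B.toList).map (fun k => ((B.toList.count k : Int))) := by
      simp [PySem.Dict.values, PySem.Dict.items_counter]
    show (if ((PySem.Dict.counter B.toList).values.any fun v => decide (PySem.Int.mod v A ≠ 0)) = true then -1 else 1)
        = if ∀ c ∈ PySem.List.sorted B.toList (fun c => c) false,
            A ∣ ((PySem.List.sorted B.toList (fun c => c) false).count c : Int) then 1 else -1
    rw [hv]
    have hany : ((PySem.Set.ofList B.toList).map (fun k => ((B.toList.count k : Int)))).any
          (fun v => decide (PySem.Int.mod v A ≠ 0)) = true
        ↔ ∃ c ∈ B.toList, ¬ A ∣ (B.toList.count c : Int) := by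
      simp [List.any_map, List.any_eq_true, PySem.Set.mem_ofList,
        PySem.Int.mod_eq_zero_iff_dvd, Function.comp]
    have hcond : (∀ c ∈ PySem.List.sorted B.toList (fun c => c) false,
          A ∣ ((PySem.List.sorted B.toList (fun c => c) false).count c : Int))
        ↔ ∀ c ∈ B.toList, A ∣ (B.toList.count c : Int) := by
      constructor
      · intro h c hc
        have := h c ((PySem.List.mem_sorted B.toList (fun c => c) false c).mpr hc)
        rwa [(PySem.List.sorted_perm B.toList (fun c => c) false).count_eq c] at this
      · intro h c hc
        rw [(PySem.List.sorted_perm B.toList (fun c => c) false).count_eq c]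
        exact h c ((PySem.List.mem_sorted B.toList (fun c => c) false c).mp hc)
    by_cases hall : ∀ c ∈ B.toList, A ∣ (B.toList.count c : Int)
    · rw [if_neg, if_pos (hcond.mpr hall)]
      rw [hany]
      push_neg
      exact hall
    · rw [if_pos, if_neg (fun h => hall (hcond.mp h))]
      rw [hany]
      push_neg at hall
      obtain ⟨c, hc, hnc⟩ := hall
      exact ⟨c, hc, hnc⟩
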